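-- pv_equiv track=rewrite | github.com/tmu-nlp/UniTP | utils/math_ops.py | lr_gen
-- ===== SOURCE A (Python) =====
-- def lr_gen(list_or_tuple, start):
--     n = len(list_or_tuple) - 1
--     radius = 1
--     while True:
--         lhs = start - radius
--         has_lhs = 0 <= lhs
--         if has_lhs:
--             yield list_or_tuple[lhs]
--         rhs = start + radius
--         has_rhs = rhs <= n
--         if has_rhs:
--             yield list_or_tuple[rhs]
--         if has_lhs or has_rhs:
--             radius += 1
--             continue
--         break
-- ===== SOURCE B (Python) =====
-- def lr_gen(list_or_tuple, start):
--     # Sort-based reformulation: collect all candidate indices (everything but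
--     # `start` itself, as the generator's two raw ranges produce them), then
--     # order them by outward distance from `start`, left before right at equal
--     # distance, and yield the elements in that order.
--     idx = list(range(start)) + list(range(start + 1, len(list_or_tuple)))
--     idx.sort(key=lambda i: 2 * abs(i - start) + (i > start))
--     for i in idx:
--         yield list_or_tuple[i]
-- ===== Notes on version B (the rewrite author's own statement) =====
-- stated objective: alternative
-- what changed: B replaces A's radius-counter while-True interleaving loop by a sort: it builds the candidate index list once and sorts it by an outward-distance key (left before right on ties), then yields by those indices.
import Mathlib
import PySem

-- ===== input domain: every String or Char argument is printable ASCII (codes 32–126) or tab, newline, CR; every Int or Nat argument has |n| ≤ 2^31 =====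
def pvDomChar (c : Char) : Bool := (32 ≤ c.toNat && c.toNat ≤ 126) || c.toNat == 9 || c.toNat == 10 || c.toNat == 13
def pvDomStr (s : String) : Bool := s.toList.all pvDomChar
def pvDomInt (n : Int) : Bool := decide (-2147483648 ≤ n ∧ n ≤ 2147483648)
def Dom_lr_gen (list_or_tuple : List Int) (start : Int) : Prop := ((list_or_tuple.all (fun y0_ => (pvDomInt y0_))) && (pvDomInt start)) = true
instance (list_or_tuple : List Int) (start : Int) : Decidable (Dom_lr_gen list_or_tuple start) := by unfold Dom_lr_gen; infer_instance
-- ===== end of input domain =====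

-- B replaces A's radius-counter interleaving loop by a sort of the candidate indices
-- under an outward-distance key (objective: alternative algorithm, same result).

-- ===== PORT A =====
-- A's `while True` loop with radius counter; `none` from pyGet? = Python IndexError,
-- where the generator stops raising (those inputs lie outside Pre_lr_gen).
def lrLoopA (xs : List Int) (s : Int) : Nat → Int → List Int
  | 0, _ => []            -- fuel guard only; lr_gen passes enough fuel for the loop to finish
  | fuel + 1, radius =>
    if 0 ≤ s - radius then
      match PySem.List.pyGet? xs (s - radius) with
      | none => []
      | some v =>
        if s + radius ≤ (xs.length : Int) - 1 then
          match PySem.List.pyGet? xs (s + radius) with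
          | none => [v]
          | some w => v :: w :: lrLoopA xs s fuel (radius + 1)
        else v :: lrLoopA xs s fuel (radius + 1)
    else
      if s + radius ≤ (xs.length : Int) - 1 then
        match PySem.List.pyGet? xs (s + radius) with
        | none => []
        | some w => w :: lrLoopA xs s fuel (radius + 1)
      else []

def lr_gen (list_or_tuple : List Int) (start : Int) : List Int :=
  lrLoopA list_or_tuple start ((max start ((list_or_tuple.length : Int) - 1 - start)).toNat + 1) 1

-- ===== PORT B =====
-- B's sort key: 2*abs(i - start) + (i > start)
def lrKeyB (s i : Int) : Int := 2 * |i - s| + (if s < i then 1 else 0)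

-- B's `for i in idx: yield list_or_tuple[i]`; `none` = IndexError, generator stops.
def lrGatherB (xs : List Int) : List Int → List Int
  | [] => []
  | i :: is =>
    match PySem.List.pyGet? xs i with
    | none => []
    | some v => v :: lrGatherB xs is

def lr_gen_alt (list_or_tuple : List Int) (start : Int) : List Int :=
  let idx := PySem.List.pyRange 0 start 1
             ++ PySem.List.pyRange (start + 1) (list_or_tuple.length : Int) 1
  lrGatherB list_or_tuple (PySem.List.sorted idx (lrKeyB start) false)

-- ===== PRECONDITION & SPEC =====
-- Pre_ excludes exactly the inputs where the Python generator raises IndexError: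
-- start > len (first left index start-1 is out of range) or start < -(len+1)
-- (first right index start+1 is below -len).
def Pre_lr_gen (list_or_tuple : List Int) (start : Int) : Prop :=
  -((list_or_tuple.length : Int) + 1) ≤ start ∧ start ≤ (list_or_tuple.length : Int)
instance (list_or_tuple : List Int) (start : Int) : Decidable (Pre_lr_gen list_or_tuple start) := by unfold Pre_lr_gen; infer_instance
def pvWitness_lr_gen : List Int × Int := ([10, 20, 30, 40], 1)

def Spec_lr_gen (list_or_tuple : List Int) (start : Int) (out : List Int) : Prop := out = lr_gen_alt list_or_tuple start
instance (list_or_tuple : List Int) (start : Int) (out : List Int) : Decidable (Spec_lr_gen list_or_tuple start out) := by unfold Spec_lr_gen; infer_instance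

-- ===== CLAIM (what is proved, stated in full; the proofs are below) =====
def Claim_equal_lr_gen : Prop := ∀ (list_or_tuple : List Int) (start : Int), Dom_lr_gen list_or_tuple start → Pre_lr_gen list_or_tuple start → Spec_lr_gen list_or_tuple start (lr_gen list_or_tuple start)

-- ===== LEMMAS AND PROOFS =====

-- The outward index order A's loop visits, from radius `r` with the given fuel.
def tIdx (len s : Int) : Nat → Int → List Int
  | 0, _ => []
  | fuel + 1, r =>
    if 0 ≤ s - r then
      if s + r ≤ len - 1 then (s - r) :: (s + r) :: tIdx len s fuel (r + 1)
      else (s - r) :: tIdx len s fuel (r + 1)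
    else
      if s + r ≤ len - 1 then (s + r) :: tIdx len s fuel (r + 1)
      else []

theorem lrKeyB_left (s r : Int) (hr : 1 ≤ r) : lrKeyB s (s - r) = 2 * r := by
  unfold lrKeyB
  rw [show s - r - s = -r by ring, abs_neg, abs_of_nonneg (by omega : (0:Int) ≤ r),
    if_neg (by omega : ¬ s < s - r)]
  omega

theorem lrKeyB_right (s r : Int) (hr : 1 ≤ r) : lrKeyB s (s + r) = 2 * r + 1 := by
  unfold lrKeyB
  rw [show s + r - s = r by ring, abs_of_nonneg (by omega : (0:Int) ≤ r),
    if_pos (by omega : s < s + r)]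

-- Every index tIdx emits from radius r has key ≥ 2*r.
theorem tIdx_key_lb (len s : Int) : ∀ (fuel : Nat) (r : Int), 1 ≤ r →
    ∀ j ∈ tIdx len s fuel r, 2 * r ≤ lrKeyB s j := by
  intro fuel
  induction fuel with
  | zero => intro r _ j hj; simp [tIdx] at hj
  | succ fuel ih =>
    intro r hr j hj
    have hk1 := lrKeyB_left s r hr
    have hk2 := lrKeyB_right s r hr
    have iht := fun j h => ih (r + 1) (by omega) j h
    unfold tIdx at hj
    split_ifs at hj <;>
      simp only [List.mem_cons, List.not_mem_nil] at hj
    · rcases hj with h | h | h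
      · subst h; omega
      · subst h; omega
      · have := iht j h; omega
    · rcases hj with h | h
      · subst h; omega
      · have := iht j h; omega
    · rcases hj with h | h
      · subst h; omega
      · have := iht j h; omega

-- tIdx is strictly increasing under the key.
theorem tIdx_pairwise (len s : Int) : ∀ (fuel : Nat) (r : Int), 1 ≤ r →
    (tIdx len s fuel r).Pairwise (fun a b => lrKeyB s a < lrKeyB s b) := by
  intro fuel
  induction fuel with
  | zero => intro r _; simp [tIdx]
  | succ fuel ih =>
    intro r hr
    have hk1 := lrKeyB_left s r hr
    have hk2 := lrKeyB_right s r hr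
    have hlb := tIdx_key_lb len s fuel (r + 1) (by omega)
    have iht := ih (r + 1) (by omega)
    unfold tIdx
    split_ifs
    · refine List.pairwise_cons.mpr ⟨?_, List.pairwise_cons.mpr ⟨?_, iht⟩⟩
      · intro j hj
        rcases List.mem_cons.mp hj with h | h
        · subst h; omega
        · have := hlb j h; omega
      · intro j hj; have := hlb j hj; omega
    · refine List.pairwise_cons.mpr ⟨?_, iht⟩
      intro j hj; have := hlb j hj; omega
    · refine List.pairwise_cons.mpr ⟨?_, iht⟩
      intro j hj; have := hlb j hj; omega
    · exact List.Pairwise.nil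

-- tIdx from radius r is a permutation of the remaining candidate indices.
theorem tIdx_perm (len s : Int) : ∀ (fuel : Nat) (r : Int), 1 ≤ r →
    max (s - r + 1) (len - s - r) ≤ (fuel : Int) →
    (tIdx len s fuel r).Perm
      (PySem.List.pyRange 0 (s - r + 1) 1 ++ PySem.List.pyRange (s + r) len 1) := by
  intro fuel
  induction fuel with
  | zero =>
    intro r _ hf
    rw [PySem.List.pyRange_one_eq_nil (by omega), PySem.List.pyRange_one_eq_nil (by omega)]
    simp [tIdx]
  | succ fuel ih =>
    intro r hr hf
    have iht := fun h => ih (r + 1) (by omega) h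
    unfold tIdx
    by_cases hl : 0 ≤ s - r
    · by_cases hrh : s + r ≤ len - 1
      · rw [if_pos hl, if_pos hrh,
          PySem.List.pyRange_one_succ_right (by omega : (0:Int) ≤ s - r),
          PySem.List.pyRange_one_cons (by omega : s + r < len)]
        have hp := iht (by push_cast at hf ⊢; omega)
        rw [show s - (r + 1) + 1 = s - r by ring, show s + (r + 1) = s + r + 1 by ring] at hp
        have h0 := (hp.cons (s + r)).cons (s - r)
        have h2 : (PySem.List.pyRange 0 (s - r) 1
              ++ ((s - r) :: (s + r) :: PySem.List.pyRange (s + r + 1) len 1)).Perm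
            ((s - r) :: (s + r) :: (PySem.List.pyRange 0 (s - r) 1
              ++ PySem.List.pyRange (s + r + 1) len 1)) :=
          List.perm_middle.trans (List.Perm.cons _ List.perm_middle)
        have hshape : (PySem.List.pyRange 0 (s - r) 1 ++ [s - r])
              ++ (s + r) :: PySem.List.pyRange (s + r + 1) len 1
            = PySem.List.pyRange 0 (s - r) 1
              ++ ((s - r) :: (s + r) :: PySem.List.pyRange (s + r + 1) len 1) := by
          simp
        rw [hshape]
        exact h0.trans h2.symm
      · rw [if_pos hl, if_neg hrh,
          PySem.List.pyRange_one_succ_right (by omega : (0:Int) ≤ s - r),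
          PySem.List.pyRange_one_eq_nil (by omega : len ≤ s + r)]
        have hp := iht (by push_cast at hf ⊢; omega)
        rw [show s - (r + 1) + 1 = s - r by ring,
          PySem.List.pyRange_one_eq_nil (by omega : len ≤ s + (r + 1))] at hp
        simp only [List.append_nil] at hp ⊢
        exact (hp.cons _).trans (List.perm_append_singleton _ _).symm
    · by_cases hrh : s + r ≤ len - 1
      · rw [if_neg hl, if_pos hrh,
          PySem.List.pyRange_one_eq_nil (by omega : s - r + 1 ≤ 0),
          PySem.List.pyRange_one_cons (by omega : s + r < len)]
        have hp := iht (by push_cast at hf ⊢; omega)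
        rw [show s + (r + 1) = s + r + 1 by ring,
          PySem.List.pyRange_one_eq_nil (by omega : s - (r + 1) + 1 ≤ 0)] at hp
        simp only [List.nil_append] at hp ⊢
        exact hp.cons _
      · rw [if_neg hl, if_neg hrh,
          PySem.List.pyRange_one_eq_nil (by omega : s - r + 1 ≤ 0),
          PySem.List.pyRange_one_eq_nil (by omega : len ≤ s + r)]
        simp

-- In-range indexing never raises: pyGet? is `some` of the total pyGetD.
theorem pyGet?_eq_some_pyGetD (xs : List Int) (i : Int)
    (h : PySem.Raise.InRange xs.length i) :
    PySem.List.pyGet? xs i = some (PySem.List.pyGetD xs i 0) := by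
  rcases hg : PySem.List.pyGet? xs i with _ | v
  · rw [PySem.List.pyGet?_eq_none_iff] at hg; exact absurd h hg
  · simp [PySem.List.pyGetD, hg]

-- Sorting the candidate indices by the outward key yields exactly A's visit order.
theorem sorted_eq_tIdx (len s : Int) (fuel : Nat)
    (hf : max s (len - 1 - s) ≤ (fuel : Int)) :
    PySem.List.sorted (PySem.List.pyRange 0 s 1 ++ PySem.List.pyRange (s + 1) len 1)
      (lrKeyB s) false = tIdx len s fuel 1 := by
  refine PySem.List.sorted_eq_of_perm_of_pairwise_lt _ _ _ ?_
    (tIdx_pairwise len s fuel 1 le_rfl)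
  have hp := tIdx_perm len s fuel 1 le_rfl (by omega)
  simpa using hp

-- Under Pre_, gathering never hits an IndexError: it is a map of pyGetD.
theorem lrGatherB_eq_map (xs : List Int) :
    ∀ l : List Int, (∀ i ∈ l, PySem.Raise.InRange xs.length i) →
      lrGatherB xs l = l.map (fun i => PySem.List.pyGetD xs i 0) := by
  intro l
  induction l with
  | nil => intro _; simp [lrGatherB]
  | cons i is ih =>
    intro h
    rw [List.map_cons, lrGatherB, pyGet?_eq_some_pyGetD xs i (h i (by simp)),
      ih (fun j hj => h j (by simp [hj]))]

-- Under Pre_, A's loop is the map of pyGetD over its visit order.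
theorem lrLoopA_eq_map (xs : List Int) (s : Int)
    (hpre : -((xs.length : Int) + 1) ≤ s ∧ s ≤ (xs.length : Int)) :
    ∀ (fuel : Nat) (r : Int), 1 ≤ r →
      lrLoopA xs s fuel r
        = (tIdx (xs.length : Int) s fuel r).map (fun i => PySem.List.pyGetD xs i 0) := by
  intro fuel
  induction fuel with
  | zero => intro r _; simp [lrLoopA, tIdx]
  | succ fuel ih =>
    intro r hr
    have iht := ih (r + 1) (by omega)
    unfold lrLoopA tIdx
    by_cases hl : 0 ≤ s - r
    · have hg := pyGet?_eq_some_pyGetD xs (s - r) ⟨by omega, by omega⟩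
      by_cases hrh : s + r ≤ (xs.length : Int) - 1
      · have hg2 := pyGet?_eq_some_pyGetD xs (s + r) ⟨by omega, by omega⟩
        simp [hrh, hg, hg2, iht, show r ≤ s by omega]
      · simp [hrh, hg, iht, show r ≤ s by omega]
    · by_cases hrh : s + r ≤ (xs.length : Int) - 1
      · have hg2 := pyGet?_eq_some_pyGetD xs (s + r) ⟨by omega, by omega⟩
        simp [hrh, hg2, iht, show ¬ r ≤ s by omega]
      · simp [hrh, show ¬ r ≤ s by omega]

-- ===== VERDICT (by name: the statement is the Claim_ definition above) =====
theorem lr_gen_spec : Claim_equal_lr_gen := by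
  intro xs s _ hpre
  unfold Spec_lr_gen lr_gen lr_gen_alt
  obtain ⟨h1, h2⟩ := hpre
  set fuel : Nat := (max s ((xs.length : Int) - 1 - s)).toNat + 1 with hfuel
  have hfb : max s ((xs.length : Int) - 1 - s) ≤ (fuel : Int) := by
    rw [hfuel]; push_cast; omega
  have hs := sorted_eq_tIdx (xs.length : Int) s fuel (by omega)
  have hmem : ∀ i ∈ PySem.List.sorted
      (PySem.List.pyRange 0 s 1 ++ PySem.List.pyRange (s + 1) (xs.length : Int) 1)
      (lrKeyB s) false, PySem.Raise.InRange xs.length i := by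
    intro i hi
    rw [PySem.List.mem_sorted] at hi
    simp only [List.mem_append, PySem.List.mem_pyRange_one] at hi
    rcases hi with ⟨hi1, hi2⟩ | ⟨hi1, hi2⟩ <;> exact ⟨by omega, by omega⟩
  rw [lrGatherB_eq_map xs _ hmem, hs, lrLoopA_eq_map xs s ⟨h1, h2⟩ fuel 1 le_rfl]
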